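-- pv_equiv track=rewrite | github.com/superhac/vpinfe | managerui/config_fields.py | sort_input_mapping_keys
-- ===== SOURCE A (Python) =====
-- INPUT_MAPPING_ACTION_ORDER = [
--     "left",
--     "right",
--     "up",
--     "down",
--     "select",
--     "menu",
--     "back",
--     "exit",
--     "collectionmenu",
--     "tutorial",
-- ]
--
-- def sort_input_mapping_keys(keys: list[str], prefix: str) -> list[str]:
--     ordered_keys: list[str] = []
--     present_keys = set(keys)
--
--     for action in INPUT_MAPPING_ACTION_ORDER:
--         mapping_key = f"{prefix}{action}"
--         if mapping_key in present_keys: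
--             ordered_keys.append(mapping_key)
--
--     for key in keys:
--         if key not in ordered_keys:
--             ordered_keys.append(key)
--
--     return ordered_keys
-- ===== SOURCE B (Python) =====
-- INPUT_MAPPING_ACTION_ORDER = [
--     "left",
--     "right",
--     "up",
--     "down",
--     "select",
--     "menu",
--     "back",
--     "exit",
--     "collectionmenu",
--     "tutorial",
-- ]
--
-- def sort_input_mapping_keys(keys: list[str], prefix: str) -> list[str]:
--     rank = {f"{prefix}{action}": index
--             for index, action in enumerate(INPUT_MAPPING_ACTION_ORDER)}
--     default = len(INPUT_MAPPING_ACTION_ORDER)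
--     return sorted(dict.fromkeys(keys), key=lambda key: rank.get(key, default))
-- ===== Notes on version B (the rewrite author's own statement) =====
-- stated objective: faster
-- what changed: A's two partition passes (fixed-order action scan, then a second pass whose 'key not in ordered_keys' membership test rescans the growing output list) are replaced by building a rank table once and doing a single stable sort of the deduplicated keys by rank.
import Mathlib
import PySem

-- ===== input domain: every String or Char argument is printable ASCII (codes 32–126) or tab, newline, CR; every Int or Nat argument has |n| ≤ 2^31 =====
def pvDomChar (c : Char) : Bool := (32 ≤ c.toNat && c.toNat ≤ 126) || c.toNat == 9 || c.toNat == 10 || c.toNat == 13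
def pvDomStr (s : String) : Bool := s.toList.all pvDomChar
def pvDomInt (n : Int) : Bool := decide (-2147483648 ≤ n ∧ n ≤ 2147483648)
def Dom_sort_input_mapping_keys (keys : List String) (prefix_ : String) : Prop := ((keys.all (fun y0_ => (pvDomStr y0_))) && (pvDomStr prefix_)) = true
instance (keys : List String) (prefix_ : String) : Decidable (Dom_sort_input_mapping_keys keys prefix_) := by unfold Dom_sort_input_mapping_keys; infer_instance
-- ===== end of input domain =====

-- B replaces A's two partition passes (the second of which rescans the growing output
-- list per key) by a rank table plus one stable sort of the deduplicated keys (faster).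

def pvINPUT_MAPPING_ACTION_ORDER : List String :=
  ["left", "right", "up", "down", "select", "menu", "back", "exit", "collectionmenu", "tutorial"]

-- ===== PORT A =====
def sort_input_mapping_keys (keys : List String) (prefix_ : String) : List String :=
  let present : PySem.Set String := PySem.Set.ofList keys
  let ordered_keys : List String :=
    pvINPUT_MAPPING_ACTION_ORDER.foldl (fun acc action =>
      let mapping_key := prefix_ ++ action
      if present.contains mapping_key then acc ++ [mapping_key] else acc) []
  keys.foldl (fun acc key => if acc.contains key then acc else acc ++ [key]) ordered_keys

-- ===== PORT B =====
def sort_input_mapping_keys_alt (keys : List String) (prefix_ : String) : List String :=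
  let rank : PySem.Dict String Int :=
    (PySem.List.enumerate pvINPUT_MAPPING_ACTION_ORDER).foldl
      (fun d q => d.insert (prefix_ ++ q.2) q.1) PySem.Dict.empty
  let default : Int := (pvINPUT_MAPPING_ACTION_ORDER.length : Int)
  PySem.List.sorted (PySem.List.dedup keys) (fun key => rank.getD key default) false

-- ===== PRECONDITION & SPEC =====
def Spec_sort_input_mapping_keys (keys : List String) (prefix_ : String) (out : List String) : Prop := out = sort_input_mapping_keys_alt keys prefix_
instance (keys : List String) (prefix_ : String) (out : List String) : Decidable (Spec_sort_input_mapping_keys keys prefix_ out) := by unfold Spec_sort_input_mapping_keys; infer_instance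

-- ===== CLAIM (what is proved, stated in full; the proofs are below) =====
def Claim_equal_sort_input_mapping_keys : Prop := ∀ (keys : List String) (prefix_ : String), Dom_sort_input_mapping_keys keys prefix_ → Spec_sort_input_mapping_keys keys prefix_ (sort_input_mapping_keys keys prefix_)

-- ===== LEMMAS AND PROOFS =====

-- String append is left-cancellative, on `==`.
theorem pvCancel (p a b : String) : (p ++ a == p ++ b) = (a == b) := by
  rcases Bool.eq_false_or_eq_true (a == b) with h | h <;> simp_all [String.ext_iff]

@[simp] theorem pvInsertBy_nil {α : Type} (before : α → α → Bool) (x : α) :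
    PySem.List.insertBy before x [] = [x] := rfl

@[simp] theorem pvInsertBy_cons {α : Type} (before : α → α → Bool) (x y : α) (ys : List α) :
    PySem.List.insertBy before x (y :: ys) =
      if before x y then x :: y :: ys else y :: PySem.List.insertBy before x ys := rfl

theorem pvInsertBy_append {α : Type} (before : α → α → Bool) (x : α) (ys zs : List α)
    (h : ∀ y ∈ ys, before x y = false) :
    PySem.List.insertBy before x (ys ++ zs) = ys ++ PySem.List.insertBy before x zs := by
  induction ys with
  | nil => simp
  | cons y ys ih =>
    simp only [List.cons_append, pvInsertBy_cons, h y (by simp)]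
    simp only [Bool.false_eq_true, if_false, List.cons_inj_right]
    exact ih (fun y hy => h y (by simp [hy]))

theorem pvInsertBy_all {α : Type} (before : α → α → Bool) (x : α) (zs : List α)
    (h : ∀ z ∈ zs, before x z = true) :
    PySem.List.insertBy before x zs = x :: zs := by
  cases zs with
  | nil => rfl
  | cons z zs => simp [h z (by simp)]

-- Stable insertion sort of a duplicate-free list under an "increasing ranks, common big
-- default" key: ranked elements first in rank order, then the rest in original order.
theorem pvMain {akeys : List String} (key : String → Int) (c : Int)
    (hnd : akeys.Nodup)
    (hinc : akeys.Pairwise (fun a b => key a < key b))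
    (hlt : ∀ a ∈ akeys, key a < c)
    (hnm : ∀ k, k ∉ akeys → key k = c) :
    ∀ (D : List String), D.Nodup →
      PySem.List.sorted D key false =
        akeys.filter (fun a => D.contains a) ++ D.filter (fun k => !akeys.contains k) := by
  intro D
  induction D using List.reverseRecOn with
  | nil =>
    intro _
    simp [PySem.List.sorted_eq_foldl_insertBy]
  | append_singleton L x ih =>
    intro hnd'
    have hxL : x ∉ L := by simp [List.nodup_append] at hnd'; tauto
    have hL : L.Nodup := hnd'.of_append_left
    rw [PySem.List.sorted_eq_foldl_insertBy, List.foldl_append]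
    rw [← PySem.List.sorted_eq_foldl_insertBy, ih hL]
    simp only [List.foldl_cons, List.foldl_nil]
    by_cases hxa : x ∈ akeys
    · obtain ⟨u, v, huv⟩ := List.append_of_mem hxa
      subst huv
      have hux : ∀ a ∈ u, a ≠ x := by
        have := hnd; simp [List.nodup_append] at this
        exact fun a ha => (this.2.2 a ha).1
      have hvx : ∀ a ∈ v, a ≠ x := by
        have := hnd; simp [List.nodup_append] at this
        exact fun a ha h => this.2.1.1 (h ▸ ha)
      have hu : ∀ y ∈ u, key y < key x := by
        have := hinc; rw [List.pairwise_append] at this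
        exact fun y hy => this.2.2 y hy x (by simp)
      have hv : ∀ y ∈ v, key x < key y := by
        have := hinc; rw [List.pairwise_append] at this
        exact fun y hy => (List.pairwise_cons.mp this.2.1).1 y hy
      have hcL : L.contains x = false := by simp [hxL]
      have hcontL : ∀ a, a ≠ x → (L ++ [x]).contains a = L.contains a := by
        intro a ha
        simp
        intro h; exact absurd h ha
      have e1 : (u ++ x :: v).filter (fun a => L.contains a) =
          u.filter (fun a => L.contains a) ++ v.filter (fun a => L.contains a) := by
        rw [List.filter_append, List.filter_cons, hcL]
        simp
      have e2 : (u ++ x :: v).filter (fun a => (L ++ [x]).contains a) =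
          u.filter (fun a => L.contains a) ++ x :: v.filter (fun a => L.contains a) := by
        rw [List.filter_append, List.filter_cons]
        rw [List.filter_congr (fun a ha => hcontL a (hux a ha)),
            List.filter_congr (fun a ha => hcontL a (hvx a ha))]
        have hx' : (L ++ [x]).contains x = true := by simp
        rw [hx']
        simp
        congr 1
        · exact List.filter_congr (fun a _ => by simp)
        · congr 1
          exact List.filter_congr (fun a _ => by simp)
      have e3 : (L ++ [x]).filter (fun k => !(u ++ x :: v).contains k) =
          L.filter (fun k => !(u ++ x :: v).contains k) := by
        rw [List.filter_append]
        simp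
      rw [e1, e2, e3, List.append_assoc]
      rw [pvInsertBy_append]
      · rw [pvInsertBy_all]
        · simp
        · intro z hz
          rcases List.mem_append.mp hz with hz | hz
          · have : key x < key z := hv z (List.mem_of_mem_filter hz)
            simpa using this
          · have hzn : z ∉ u ++ x :: v := by
              have := List.of_mem_filter hz; simpa using this
            have : key x < c := hlt x hxa
            rw [hnm z hzn]
            simpa using this
      · intro y hy
        have : key y < key x := hu y (List.mem_of_mem_filter hy)
        simp; omega
    · have hbef : ∀ y ∈ akeys.filter (fun a => L.contains a) ++ L.filter (fun k => !akeys.contains k),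
          decide (key x < key y) = false := by
        intro y hy
        rcases List.mem_append.mp hy with hy | hy
        · have hya : y ∈ akeys := List.mem_of_mem_filter hy
          have : key y < c := hlt y hya
          simp [hnm x hxa]; omega
        · have : ¬ (akeys.contains y = true) := by
            have := List.of_mem_filter hy; simpa using this
          have hyn : y ∉ akeys := by simpa using this
          simp [hnm x hxa, hnm y hyn]
      rw [PySem.List.insertBy_of_forall_not_before _ _ _ hbef]
      have h1 : akeys.filter (fun a => (L ++ [x]).contains a) = akeys.filter (fun a => L.contains a) := by
        apply List.filter_congr
        intro a ha
        have : a ≠ x := fun h => hxa (h ▸ ha)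
        simp
        intro h; exact absurd h this
      have h2 : (L ++ [x]).filter (fun k => !akeys.contains k) =
          L.filter (fun k => !akeys.contains k) ++ [x] := by
        rw [List.filter_append]
        simp [hxa]
      rw [h1, h2, List.append_assoc]

-- The rank dictionary built by B, as a literal association list.
theorem pvRank_eq (p : String) :
    (PySem.List.enumerate pvINPUT_MAPPING_ACTION_ORDER).foldl
        (fun d q => d.insert (p ++ q.2) q.1) PySem.Dict.empty =
      PySem.Dict.mk [(p ++ "left", 0), (p ++ "right", 1), (p ++ "up", 2), (p ++ "down", 3),
        (p ++ "select", 4), (p ++ "menu", 5), (p ++ "back", 6), (p ++ "exit", 7),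
        (p ++ "collectionmenu", 8), (p ++ "tutorial", 9)] := by
  simp [pvINPUT_MAPPING_ACTION_ORDER, PySem.List.enumerate, PySem.Dict.insert,
    PySem.Dict.contains, PySem.Dict.empty, pvCancel]

-- B's key function, after pvRank_eq.
def pvKeyD (p k : String) : Int :=
  (PySem.Dict.mk [(p ++ "left", 0), (p ++ "right", 1), (p ++ "up", 2), (p ++ "down", 3),
    (p ++ "select", 4), (p ++ "menu", 5), (p ++ "back", 6), (p ++ "exit", 7),
    (p ++ "collectionmenu", 8), (p ++ "tutorial", 9)]).getD k 10

theorem pvKeyD_left (p : String) : pvKeyD p (p ++ "left") = 0 := by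
  simp [pvKeyD, PySem.Dict.getD, PySem.Dict.get?_mk_cons]
theorem pvKeyD_right (p : String) : pvKeyD p (p ++ "right") = 1 := by
  simp [pvKeyD, PySem.Dict.getD, PySem.Dict.get?_mk_cons, pvCancel]
theorem pvKeyD_up (p : String) : pvKeyD p (p ++ "up") = 2 := by
  simp [pvKeyD, PySem.Dict.getD, PySem.Dict.get?_mk_cons, pvCancel]
theorem pvKeyD_down (p : String) : pvKeyD p (p ++ "down") = 3 := by
  simp [pvKeyD, PySem.Dict.getD, PySem.Dict.get?_mk_cons, pvCancel]
theorem pvKeyD_select (p : String) : pvKeyD p (p ++ "select") = 4 := by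
  simp [pvKeyD, PySem.Dict.getD, PySem.Dict.get?_mk_cons, pvCancel]
theorem pvKeyD_menu (p : String) : pvKeyD p (p ++ "menu") = 5 := by
  simp [pvKeyD, PySem.Dict.getD, PySem.Dict.get?_mk_cons, pvCancel]
theorem pvKeyD_back (p : String) : pvKeyD p (p ++ "back") = 6 := by
  simp [pvKeyD, PySem.Dict.getD, PySem.Dict.get?_mk_cons, pvCancel]
theorem pvKeyD_exit (p : String) : pvKeyD p (p ++ "exit") = 7 := by
  simp [pvKeyD, PySem.Dict.getD, PySem.Dict.get?_mk_cons, pvCancel]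
theorem pvKeyD_collectionmenu (p : String) : pvKeyD p (p ++ "collectionmenu") = 8 := by
  simp [pvKeyD, PySem.Dict.getD, PySem.Dict.get?_mk_cons, pvCancel]
theorem pvKeyD_tutorial (p : String) : pvKeyD p (p ++ "tutorial") = 9 := by
  simp [pvKeyD, PySem.Dict.getD, PySem.Dict.get?_mk_cons, pvCancel]

theorem pvKeyD_notmem (p k : String) (h : ∀ a ∈ pvINPUT_MAPPING_ACTION_ORDER, ¬ (p ++ a = k)) :
    pvKeyD p k = 10 := by
  have h0 := h "left" (by simp [pvINPUT_MAPPING_ACTION_ORDER])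
  have h1 := h "right" (by simp [pvINPUT_MAPPING_ACTION_ORDER])
  have h2 := h "up" (by simp [pvINPUT_MAPPING_ACTION_ORDER])
  have h3 := h "down" (by simp [pvINPUT_MAPPING_ACTION_ORDER])
  have h4 := h "select" (by simp [pvINPUT_MAPPING_ACTION_ORDER])
  have h5 := h "menu" (by simp [pvINPUT_MAPPING_ACTION_ORDER])
  have h6 := h "back" (by simp [pvINPUT_MAPPING_ACTION_ORDER])
  have h7 := h "exit" (by simp [pvINPUT_MAPPING_ACTION_ORDER])
  have h8 := h "collectionmenu" (by simp [pvINPUT_MAPPING_ACTION_ORDER])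
  have h9 := h "tutorial" (by simp [pvINPUT_MAPPING_ACTION_ORDER])
  simp [pvKeyD, PySem.Dict.getD, PySem.Dict.get?, h0, h1, h2, h3, h4, h5, h6, h7, h8, h9]

theorem pvPrefixInj (p : String) : Function.Injective (fun a => p ++ a) := by
  intro a b h
  simpa [String.ext_iff] using h

-- ===== VERDICT (by name: the statement is the Claim_ definition above) =====
theorem sort_input_mapping_keys_spec : Claim_equal_sort_input_mapping_keys := by
  intro keys prefix_ _
  unfold Spec_sort_input_mapping_keys
  unfold sort_input_mapping_keys sort_input_mapping_keys_alt
  simp only [pvRank_eq, PySem.List.dedup_eq_ofList]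
  set D : List String := PySem.Set.ofList keys with hD
  set akeys : List String := pvINPUT_MAPPING_ACTION_ORDER.map (fun a => prefix_ ++ a) with hak
  have hlen : ((pvINPUT_MAPPING_ACTION_ORDER.length : Nat) : Int) = 10 := by
    simp [pvINPUT_MAPPING_ACTION_ORDER]
  have hkey : (fun k => (PySem.Dict.mk [(prefix_ ++ "left", 0), (prefix_ ++ "right", 1),
      (prefix_ ++ "up", 2), (prefix_ ++ "down", 3), (prefix_ ++ "select", 4),
      (prefix_ ++ "menu", 5), (prefix_ ++ "back", 6), (prefix_ ++ "exit", 7),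
      (prefix_ ++ "collectionmenu", 8), (prefix_ ++ "tutorial", 9)]).getD k
        ((pvINPUT_MAPPING_ACTION_ORDER.length : Nat) : Int)) = pvKeyD prefix_ := by
    funext k
    rw [hlen]
    rfl
  rw [hkey]
  -- B side via pvMain
  have hB : PySem.List.sorted D (pvKeyD prefix_) false =
      akeys.filter (fun a => D.contains a) ++ D.filter (fun k => !akeys.contains k) := by
    apply pvMain (key := pvKeyD prefix_) (c := 10)
    · exact (by decide : pvINPUT_MAPPING_ACTION_ORDER.Nodup).map (pvPrefixInj prefix_)
    · rw [hak]
      rw [List.pairwise_map]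
      simp [pvINPUT_MAPPING_ACTION_ORDER, List.pairwise_cons, pvKeyD_left, pvKeyD_right,
        pvKeyD_up, pvKeyD_down, pvKeyD_select, pvKeyD_menu, pvKeyD_back, pvKeyD_exit,
        pvKeyD_collectionmenu, pvKeyD_tutorial]
    · intro a ha
      rw [hak] at ha
      simp [pvINPUT_MAPPING_ACTION_ORDER] at ha
      rcases ha with rfl | rfl | rfl | rfl | rfl | rfl | rfl | rfl | rfl | rfl <;>
        simp [pvKeyD_left, pvKeyD_right, pvKeyD_up, pvKeyD_down, pvKeyD_select, pvKeyD_menu,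
          pvKeyD_back, pvKeyD_exit, pvKeyD_collectionmenu, pvKeyD_tutorial]
    · intro k hk
      apply pvKeyD_notmem
      intro a ha hak'
      exact hk (by rw [hak]; exact List.mem_map.mpr ⟨a, ha, hak'⟩)
    · rw [hD]; exact PySem.Set.nodup_ofList keys
  rw [hB]
  -- A side: the second loop is Set.update of the first loop's result
  have hA2 : ∀ (init : List String),
      keys.foldl (fun acc key => if acc.contains key then acc else acc ++ [key]) init =
        PySem.Set.update init keys := by
    intro init
    rw [PySem.Set.update]
    apply PySem.List.foldl_congr_mem
    intro acc x _
    simp [PySem.Set.add, PySem.Set.contains_eq_listContains]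
  rw [hA2, PySem.Set.update_eq_append_filter]
  -- first loop: append-if shape
  rw [PySem.List.foldl_append_if (p := fun a => PySem.Set.contains (PySem.Set.ofList keys) (prefix_ ++ a))
    (f := fun a => prefix_ ++ a)]
  simp only [List.nil_append]
  have hacts : (pvINPUT_MAPPING_ACTION_ORDER.filter
      (fun a => PySem.Set.contains (PySem.Set.ofList keys) (prefix_ ++ a))).map (fun a => prefix_ ++ a) =
      akeys.filter (fun a => D.contains a) := by
    rw [hak, List.filter_map]
    rfl
  rw [hacts]
  congr 1
  apply List.filter_congr
  intro y hy
  have hyD : y ∈ D := hy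
  congr 1
  by_cases hya : y ∈ akeys
  · simp [hya, hyD]
  · simp [hya]
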